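-- pv_equiv track=rewrite | github.com/IbrahimCp/battle | backend/app/problem/service.py | _find_package_root
-- ===== SOURCE A (Python) =====
-- def _find_package_root(names: list[str]) -> str:
--     if "problem.xml" in names:
--         return ""
--     for name in names:
--         if name.endswith("/problem.xml"):
--             parts = name.split("/")
--             if len(parts) == 2:
--                 return parts[0] + "/"
--     for name in names:
--         if name.endswith("problem.xml"):
--             return name[: -len("problem.xml")]
--     return ""
-- ===== SOURCE B (Python) =====
-- def _find_package_root(names: list[str]) -> str:
--     found_exact = False
--     best_depth2 = None
--     best_any = None
--     for name in names:
--         if name == "problem.xml":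
--             found_exact = True
--         if best_depth2 is None and name.endswith("/problem.xml"):
--             parts = name.split("/")
--             if len(parts) == 2:
--                 best_depth2 = parts[0] + "/"
--         if best_any is None and name.endswith("problem.xml"):
--             best_any = name[: -len("problem.xml")]
--     if found_exact:
--         return ""
--     if best_depth2 is not None:
--         return best_depth2
--     if best_any is not None:
--         return best_any
--     return ""
-- ===== Notes on version B (the rewrite author's own statement) =====
-- stated objective: alternative
-- what changed: Replaces A's three passes over the list (membership test plus two scan loops) with a single pass maintaining three accumulators (exact-match flag, first depth-2 candidate, first any-suffix candidate) and picking the answer by priority afterwards.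
import Mathlib
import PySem

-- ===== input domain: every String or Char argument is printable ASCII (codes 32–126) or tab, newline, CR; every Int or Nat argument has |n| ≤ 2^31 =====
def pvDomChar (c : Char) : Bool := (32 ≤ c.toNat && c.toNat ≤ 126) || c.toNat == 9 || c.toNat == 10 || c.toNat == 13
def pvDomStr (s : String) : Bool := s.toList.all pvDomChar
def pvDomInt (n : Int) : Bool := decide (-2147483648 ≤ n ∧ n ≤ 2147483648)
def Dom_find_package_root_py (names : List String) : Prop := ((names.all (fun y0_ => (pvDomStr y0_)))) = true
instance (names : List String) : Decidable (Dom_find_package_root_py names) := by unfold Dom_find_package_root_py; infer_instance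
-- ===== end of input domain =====

-- B rewrites A's three passes (membership test + two scan loops) as one pass with three accumulators; objective: alternative decomposition, same cost.



-- ===== PORT A =====
-- Single-file line-by-line port of A: membership test, then the depth-2 loop, then the any-suffix loop.
-- loop 1 of A: first name ending with "/problem.xml" that splits into exactly two parts
def pvLoopA1 : List String → Option String
  | [] => none
  | name :: rest =>
    if PySem.Str.endswith name "/problem.xml" then
      -- parts = name.split("/"); split? is some since "/" ≠ ""; parts[0] always exists (split is never empty)
      let parts := (PySem.Str.split? name "/").getD []
      if parts.length == 2 then some (((PySem.List.pyGet? parts 0).getD "") ++ "/")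
      else pvLoopA1 rest
    else pvLoopA1 rest

-- loop 2 of A: first name ending with "problem.xml", with the suffix sliced off (name[:-11])
def pvLoopA2 : List String → Option String
  | [] => none
  | name :: rest =>
    if PySem.Str.endswith name "problem.xml" then
      some (PySem.Str.slice name none (some (-11)))
    else pvLoopA2 rest

def find_package_root_py (names : List String) : String :=
  if names.contains "problem.xml" then ""
  else
    match pvLoopA1 names with
    | some s => s
    | none =>
      match pvLoopA2 names with
      | some s => s
      | none => ""

-- ===== PORT B =====
-- One loop-body step of B: update (found_exact, best_depth2, best_any) for one name.
def pvStepB (st : Bool × Option String × Option String) (name : String) :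
    Bool × Option String × Option String :=
  let fe := st.1 || (name == "problem.xml")
  let d2 :=
    if st.2.1.isNone && PySem.Str.endswith name "/problem.xml" &&
        (((PySem.Str.split? name "/").getD []).length == 2) then
      some (((PySem.List.pyGet? ((PySem.Str.split? name "/").getD []) 0).getD "") ++ "/")
    else st.2.1
  let any :=
    if st.2.2.isNone && PySem.Str.endswith name "problem.xml" then
      some (PySem.Str.slice name none (some (-11)))
    else st.2.2
  (fe, d2, any)

-- B: one pass accumulating the three candidates, then pick by priority.
def find_package_root_py_alt (names : List String) : String :=
  let st := names.foldl pvStepB (false, none, none)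
  if st.1 then ""
  else
    match st.2.1 with
    | some s => s
    | none =>
      match st.2.2 with
      | some s => s
      | none => ""

-- ===== PRECONDITION & SPEC =====
def Spec_find_package_root_py (names : List String) (out : String) : Prop := out = find_package_root_py_alt names
instance (names : List String) (out : String) : Decidable (Spec_find_package_root_py names out) := by unfold Spec_find_package_root_py; infer_instance

-- ===== CLAIM (what is proved, stated in full; the proofs are below) =====
def Claim_equal_find_package_root_py : Prop := ∀ (names : List String), Dom_find_package_root_py names → Spec_find_package_root_py names (find_package_root_py names)

-- ===== LEMMAS AND PROOFS =====
-- B's fold, from any starting state, computes A's three scans (first-hit semantics via Option.or).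
theorem pvFoldB_char (names : List String) : ∀ (fe : Bool) (d2 any : Option String),
    names.foldl pvStepB (fe, d2, any) =
      (fe || names.contains "problem.xml", d2.or (pvLoopA1 names), any.or (pvLoopA2 names)) := by
  induction names with
  | nil => intro fe d2 any; simp [pvLoopA1, pvLoopA2]
  | cons n rest ih =>
    intro fe d2 any
    simp only [List.foldl_cons, pvStepB, List.contains_cons, pvLoopA1, pvLoopA2, ih]
    cases d2 <;> cases any <;>
      simp [Option.or, Bool.or_assoc, BEq.comm] <;>
      split_ifs <;> simp_all [Option.or]

-- ===== VERDICT (by name: the statement is the Claim_ definition above) =====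
theorem find_package_root_py_spec : Claim_equal_find_package_root_py := by
  intro names _
  unfold Spec_find_package_root_py find_package_root_py find_package_root_py_alt
  rw [pvFoldB_char]
  simp [Option.or]
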